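-- pv_equiv track=rewrite | github.com/HypnotizedLeda/Miza | commands/MISC.py | _n2f
-- ===== SOURCE A (Python) =====
-- def _n2f(n):
--     flag = int(n)
--     offset = max(0, (999 - flag) // 1000)
--     flag += offset * 1000
--     output = ""
--     for i in range(0, 3):
--         a = 10 ** i
--         b = flag // a
--         char = b % 10
--         char += 48
--         output += chr(char)
--     char = flag // 1000
--     char += 48
--     char -= offset
--     try:
--         return chr(char) + output[::-1]
--     except ValueError:
--         return "(0x" + hex((char + 256) & 255).upper()[2:] + ")" + output[::-1]
-- ===== SOURCE B (Python) =====
-- def _n2f(n):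
--     flag = int(n)
--     char = flag // 1000 + 48
--     output = f"{flag % 1000:03d}"
--     try:
--         return chr(char) + output
--     except ValueError:
--         return "(0x" + hex((char + 256) & 255).upper()[2:] + ")" + output
-- ===== Notes on version B (the rewrite author's own statement) =====
-- stated objective: simpler
-- what changed: B drops A's offset-shift trick, the three-iteration digit-building loop and the string reversal: it computes the leading code point directly with one floor division (Python's floor division already yields A's offset-corrected value) and builds the three low digits in one shot with a zero-padded format of the positive modulo.
import Mathlib
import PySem

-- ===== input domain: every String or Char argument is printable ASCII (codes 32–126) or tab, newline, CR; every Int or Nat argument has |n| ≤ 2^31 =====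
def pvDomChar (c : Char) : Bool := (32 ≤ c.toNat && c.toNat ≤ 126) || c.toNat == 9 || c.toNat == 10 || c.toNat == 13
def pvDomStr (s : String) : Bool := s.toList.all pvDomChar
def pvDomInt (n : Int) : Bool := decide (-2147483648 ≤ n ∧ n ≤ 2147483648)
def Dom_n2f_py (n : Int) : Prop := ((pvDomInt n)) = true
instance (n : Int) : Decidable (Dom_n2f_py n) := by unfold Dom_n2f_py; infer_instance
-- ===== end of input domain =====

-- B replaces A's offset-shift trick, 3-iteration digit loop and string reversal by a direct
-- floor-division/modulo computation of the same four characters (objective: simpler).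

-- Shared primitive for the identical `hex((char + 256) & 255).upper()[2:]` expression in both
-- Pythons: uppercase hex digits of m without leading zeros; exact for 0 ≤ m < 256.
def pyHexUp (m : Int) : List Char :=
  let d : Int → Char := fun k => "0123456789ABCDEF".toList.getD k.toNat '0'
  if m < 16 then [d m] else [d (m / 16), d (m % 16)]

-- ===== PORT A =====
def n2f_py (n : Int) : String :=
  let flag := n
  let offset := max 0 (PySem.Int.floordiv (999 - flag) 1000)
  let flag := flag + offset * 1000
  -- the digit loop: for i in range(0, 3): output += chr of the i-th low digit shifted into ASCII
  let output : List Char := (PySem.List.pyRange 0 3 1).foldl (fun acc i =>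
      let a : Int := 10 ^ i.toNat
      let b := PySem.Int.floordiv flag a
      let char := PySem.Int.mod b 10
      let char := char + 48
      acc ++ [Char.ofNat char.toNat]) []
  let char := PySem.Int.floordiv flag 1000
  let char := char + 48
  let char := char - offset
  -- try: chr(char); ValueError exactly outside [0, 0x10FFFF] (surrogates excluded by Pre_);
  -- output[::-1] is output.reverse (PySem.List.slice?_none_none_neg_one)
  if 0 ≤ char ∧ char ≤ 1114111 then
    String.ofList (Char.ofNat char.toNat :: output.reverse)
  else
    String.ofList ("(0x".toList ++ pyHexUp (PySem.Int.band (char + 256) 255) ++ [')'] ++ output.reverse)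

-- ===== PORT B =====
def n2f_py_alt (n : Int) : String :=
  let flag := n
  let char := PySem.Int.floordiv flag 1000 + 48
  -- zero-padded decimal format of the remainder: exact since the remainder lies in [0, 999]
  let r := PySem.Int.mod flag 1000
  let output : List Char :=
    [Char.ofNat (r / 100 + 48).toNat, Char.ofNat (r / 10 % 10 + 48).toNat, Char.ofNat (r % 10 + 48).toNat]
  -- try: chr(char); ValueError exactly outside [0, 0x10FFFF] (surrogates excluded by Pre_)
  if 0 ≤ char ∧ char ≤ 1114111 then
    String.ofList (Char.ofNat char.toNat :: output)
  else
    String.ofList ("(0x".toList ++ pyHexUp (PySem.Int.band (char + 256) 255) ++ [')'] ++ output)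

-- ===== PRECONDITION & SPEC =====
-- Pre_ excludes only n in [55248000, 57295999]: there both Pythons return a str whose first
-- character is a lone UTF-16 surrogate code point (U+D800..U+DFFF), which no Lean String can represent.
def Pre_n2f_py (n : Int) : Prop := ¬ (55248000 ≤ n ∧ n ≤ 57295999)
instance (n : Int) : Decidable (Pre_n2f_py n) := by unfold Pre_n2f_py; infer_instance
def pvWitness_n2f_py : Int := (123456)
def Spec_n2f_py (n : Int) (out : String) : Prop := out = n2f_py_alt n
instance (n : Int) (out : String) : Decidable (Spec_n2f_py n out) := by unfold Spec_n2f_py; infer_instance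

-- ===== CLAIM (what is proved, stated in full; the proofs are below) =====
def Claim_equal_n2f_py : Prop := ∀ (n : Int), Dom_n2f_py n → Pre_n2f_py n → Spec_n2f_py n (n2f_py n)

-- ===== LEMMAS AND PROOFS =====

-- ===== VERDICT (by name: the statement is the Claim_ definition above) =====
theorem n2f_py_spec : Claim_equal_n2f_py := by
  intro n _ _
  unfold Spec_n2f_py n2f_py n2f_py_alt
  have hr : PySem.List.pyRange 0 3 1 = [0,1,2] := by decide
  rw [hr]
  have f1 : ∀ a : Int, PySem.Int.floordiv a 1 = a / 1 := fun a => PySem.Int.floordiv_eq_ediv_of_pos (by norm_num)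
  have f10 : ∀ a : Int, PySem.Int.floordiv a 10 = a / 10 := fun a => PySem.Int.floordiv_eq_ediv_of_pos (by norm_num)
  have f100 : ∀ a : Int, PySem.Int.floordiv a 100 = a / 100 := fun a => PySem.Int.floordiv_eq_ediv_of_pos (by norm_num)
  have f1000 : ∀ a : Int, PySem.Int.floordiv a 1000 = a / 1000 := fun a => PySem.Int.floordiv_eq_ediv_of_pos (by norm_num)
  have m10 : ∀ a : Int, PySem.Int.mod a 10 = a % 10 := fun a => PySem.Int.mod_eq_emod_of_pos (by norm_num)
  have m1000 : ∀ a : Int, PySem.Int.mod a 1000 = a % 1000 := fun a => PySem.Int.mod_eq_emod_of_pos (by norm_num)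
  simp only [List.foldl_cons, List.foldl_nil]
  norm_num [f1, f10, f100, f1000, m10, m1000]
  have hoff : (999 - n) / 1000 = -(n / 1000) := by omega
  rw [hoff]
  have hp100 : (10:Int) ^ Int.toNat 2 = 100 := by decide
  rw [hp100]
  by_cases hq : 0 ≤ n / 1000
  · rw [max_eq_left (by omega)]
    norm_num
    have d2 : n / 100 % 10 = n % 1000 / 100 := by omega
    have d1 : n / 10 % 10 = n % 1000 / 10 % 10 := by omega
    rw [d2, d1]
    split_ifs with h1 h2 h2
    · rfl
    · exact absurd ⟨h1.1.1, h1.2⟩ h2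
    · exact absurd ⟨⟨h2.1, by omega⟩, h2.2⟩ h1
    · rfl
  · rw [max_eq_right (by omega)]
    have hflag : n + -(n / 1000) * 1000 = n % 1000 := by omega
    rw [hflag]
    have h0 : n % 1000 / 1000 = 0 := by omega
    rw [h0]
    have d2 : n % 1000 / 100 % 10 = n % 1000 / 100 := by omega
    have d0 : n % 1000 % 10 = n % 10 := by omega
    rw [d2, d0]
    have hc : (0:Int) + 48 - -(n / 1000) = n / 1000 + 48 := by ring
    rw [hc]
    split_ifs with h1 h2 h2
    · rfl
    · exact absurd ⟨by omega, by omega⟩ h2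
    · exact absurd ⟨⟨by omega, by omega⟩, by omega⟩ h1
    · rfl
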